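-- pv_equiv track=rewrite | github.com/yoweiii/Resrv | backend/api/chat.py | _try_parse_number
-- ===== SOURCE A (Python) =====
-- from typing import Optional, Dict, Any
--
-- def _try_parse_number(text: str) -> Optional[int]:
--     digits = "".join([c for c in text if c.isdigit()])
--     if not digits:
--         return None
--     try:
--         return int(digits)
--     except:
--         return None
-- ===== SOURCE B (Python) =====
-- def _try_parse_number(text):
--     # Single pass: accumulate the value digit by digit; no intermediate string.
--     seen = False
--     value = 0
--     for c in text:
--         if c.isdigit():
--             try:
--                 d = int(c)
--             except ValueError:
--                 return None
--             value = value * 10 + d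
--             seen = True
--     return value if seen else None
-- ===== Notes on version B (the rewrite author's own statement) =====
-- stated objective: alternative
-- what changed: Single left-to-right pass accumulating value = value*10 + int(c) with a seen flag, instead of building an intermediate digit string and parsing it once with int().
import Mathlib
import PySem

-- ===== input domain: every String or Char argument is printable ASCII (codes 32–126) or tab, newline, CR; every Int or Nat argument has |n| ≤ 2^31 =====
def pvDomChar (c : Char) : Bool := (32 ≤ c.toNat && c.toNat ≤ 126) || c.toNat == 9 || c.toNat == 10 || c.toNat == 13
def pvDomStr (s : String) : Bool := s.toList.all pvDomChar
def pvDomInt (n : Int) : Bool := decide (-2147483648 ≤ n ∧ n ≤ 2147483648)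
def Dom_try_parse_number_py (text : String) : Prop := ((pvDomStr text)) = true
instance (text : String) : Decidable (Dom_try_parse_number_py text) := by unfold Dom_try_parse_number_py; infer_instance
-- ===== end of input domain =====

-- B replaces A's build-digit-string-then-int() with a single pass accumulating the value directly (same cost, no intermediate string).

-- ===== PORT A =====
-- Hand port of Python base-10 `int(s)` over the characters (whitespace strip, optional sign,
-- digits with single underscores between them); exact on the ASCII domain, it mirrors
-- PySem.Int.ofChars? step for step (that definition's helper is private, so it is transcribed here).
def pyDigitsValGo : List Char → Bool → Nat → Option Nat
  | [], afterDigit, acc => if afterDigit then some acc else none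
  | c :: rest, afterDigit, acc =>
    if c.isDigit then pyDigitsValGo rest true (acc * 10 + (c.toNat - '0'.toNat))
    else if c = '_' ∧ afterDigit = true then
      match rest with
      | d :: _ => if d.isDigit then pyDigitsValGo rest false acc else none
      | [] => none
    else none

def pyDigitsVal? : List Char → Option Nat
  | [] => none
  | cs => pyDigitsValGo cs false 0

def pyIntOfChars? (s : List Char) : Option Int :=
  let cs := ((s.dropWhile PySem.Int.isIntSpace).reverse.dropWhile PySem.Int.isIntSpace).reverse
  match cs with
  | c :: ds =>
    if c = '-' then (pyDigitsVal? ds).map (fun n => -(n : Int))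
    else if c = '+' then (pyDigitsVal? ds).map (fun n => (n : Int))
    else (pyDigitsVal? (c :: ds)).map (fun n => (n : Int))
  | [] => none

def try_parse_number_py (text : String) : Option Int :=
  -- digits = "".join([c for c in text if c.isdigit()])
  let digits := text.toList.filter PySem.Chars.isdigit
  if digits = [] then none
  else
    -- try: return int(digits) except: return None
    match pyIntOfChars? digits with
    | some n => some n
    | none => none

-- ===== PORT B =====
def try_parse_number_py_alt (text : String) : Option Int :=
  -- state (seen, value); int(c) on an ASCII digit char is c.toNat - 48 (exact on the ASCII
  -- domain; B's per-char try/except never fires there)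
  let st := text.toList.foldl
    (fun (st : Bool × Int) c =>
      if PySem.Chars.isdigit c then (true, st.2 * 10 + ((c.toNat : Int) - 48)) else st)
    (false, 0)
  if st.1 then some st.2 else none

-- ===== PRECONDITION & SPEC =====
def Spec_try_parse_number_py (text : String) (out : Option Int) : Prop := out = try_parse_number_py_alt text
instance (text : String) (out : Option Int) : Decidable (Spec_try_parse_number_py text out) := by unfold Spec_try_parse_number_py; infer_instance

-- ===== CLAIM (what is proved, stated in full; the proofs are below) =====
def Claim_equal_try_parse_number_py : Prop := ∀ (text : String), Dom_try_parse_number_py text → Spec_try_parse_number_py text (try_parse_number_py text)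

-- ===== LEMMAS AND PROOFS =====

lemma isdigit_eq (c : Char) : PySem.Chars.isdigit c = c.isDigit := by
  simp [PySem.Chars.isdigit, Char.isDigit, Char.le_def]; rfl

lemma digit_bounds (c : Char) (h : c.isDigit = true) : 48 ≤ c.toNat ∧ c.toNat ≤ 57 := by
  simp [Char.isDigit, UInt32.le_iff_toNat_le] at h; exact h

lemma not_space_of_digit (c : Char) (h : c.isDigit = true) : PySem.Int.isIntSpace c = false := by
  have hb := digit_bounds c h
  simp [PySem.Int.isIntSpace, Char.ext_iff, UInt32.ext_iff]
  omega

lemma dropWhile_space_of_digits (l : List Char) (h : ∀ c ∈ l, c.isDigit = true) :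
    l.dropWhile PySem.Int.isIntSpace = l := by
  cases l with
  | nil => rfl
  | cons a t =>
    have := not_space_of_digit a (h a (by simp))
    simp [this]

lemma go_digits (l : List Char) (h : ∀ c ∈ l, c.isDigit = true) (acc : Nat) :
    pyDigitsValGo l true acc =
      some (l.foldl (fun a c => a * 10 + (c.toNat - '0'.toNat)) acc) := by
  induction l generalizing acc with
  | nil => rfl
  | cons a t ih =>
    have ha := h a (by simp)
    simp only [pyDigitsValGo, ha, if_true, List.foldl_cons]
    exact ih (fun c hc => h c (by simp [hc])) _

lemma foldl_nat_int (l : List Char) (h : ∀ c ∈ l, c.isDigit = true) (acc : Nat) :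
    ((l.foldl (fun a c => a * 10 + (c.toNat - 48)) acc : Nat) : Int) =
      l.foldl (fun a c => a * 10 + ((c.toNat : Int) - 48)) (acc : Int) := by
  induction l generalizing acc with
  | nil => rfl
  | cons a t ih =>
    have h48 := (digit_bounds a (h a (by simp))).1
    simp only [List.foldl_cons]
    rw [ih (fun c hc => h c (by simp [hc]))]
    congr 1
    push_cast [Nat.cast_sub h48]
    ring

lemma pyIntOfChars_digits (l : List Char) (hne : l ≠ [])
    (h : ∀ c ∈ l, c.isDigit = true) :
    pyIntOfChars? l = some (l.foldl (fun a c => a * 10 + ((c.toNat : Int) - 48)) 0) := by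
  obtain ⟨a, t, rfl⟩ := List.exists_cons_of_ne_nil hne
  have hrev : ∀ c ∈ (a :: t).reverse, c.isDigit = true := by
    intro c hc; exact h c (List.mem_reverse.mp hc)
  have ha := h a (by simp)
  have hb := digit_bounds a ha
  have hnd : a ≠ '-' := by
    intro he; rw [he] at hb; simp [Char.toNat] at hb
  have hnp : a ≠ '+' := by
    intro he; rw [he] at hb; simp [Char.toNat] at hb
  have ht : ∀ c ∈ t, c.isDigit = true := fun c hc => h c (by simp [hc])
  unfold pyIntOfChars?
  rw [dropWhile_space_of_digits _ h, dropWhile_space_of_digits _ hrev, List.reverse_reverse]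
  simp only [hnd, hnp, if_false]
  have hstep : pyDigitsVal? (a :: t) = pyDigitsValGo t true (0 * 10 + (a.toNat - '0'.toNat)) := by
    show pyDigitsValGo (a :: t) false 0 = _
    simp [pyDigitsValGo, ha]
  rw [hstep, go_digits t ht]
  simp only [List.foldl_cons]
  simp
  rw [foldl_nat_int t ht, Nat.cast_sub hb.1]
  norm_num

lemma alt_filter (text : String) :
    try_parse_number_py_alt text =
      (let ds := text.toList.filter PySem.Chars.isdigit
       let st := ds.foldl (fun (st : Bool × Int) c => (true, st.2 * 10 + ((c.toNat : Int) - 48))) (false, 0)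
       if st.1 then some st.2 else none) := by
  unfold try_parse_number_py_alt
  rw [PySem.List.foldl_if_eq_foldl_filter]

lemma fold_pair (l : List Char) (b : Bool) (v : Int) (hne : l ≠ []) :
    l.foldl (fun (st : Bool × Int) c => (true, st.2 * 10 + ((c.toNat : Int) - 48))) (b, v) =
      (true, l.foldl (fun a c => a * 10 + ((c.toNat : Int) - 48)) v) := by
  induction l generalizing b v with
  | nil => exact absurd rfl hne
  | cons a t ih =>
    cases t with
    | nil => rfl
    | cons x y =>
      simp only [List.foldl_cons]
      exact ih true _ (by simp)

-- ===== VERDICT (by name: the statement is the Claim_ definition above) =====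
theorem try_parse_number_py_spec : Claim_equal_try_parse_number_py := by
  intro text _
  unfold Spec_try_parse_number_py
  rw [alt_filter]
  unfold try_parse_number_py
  set ds := text.toList.filter PySem.Chars.isdigit with hds
  have hdig : ∀ c ∈ ds, c.isDigit = true := by
    intro c hc
    have := List.of_mem_filter hc
    rwa [isdigit_eq] at this
  by_cases hne : ds = []
  · simp [hne]
  · simp only [hne, if_false]
    rw [pyIntOfChars_digits ds hne hdig, fold_pair ds false 0 hne]
    simp
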